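-- pv_equiv track=rewrite | github.com/tolldog/khonliang-developer | developer/fr_store.py | _max_priority
-- ===== SOURCE A (Python) =====
-- from typing import Any, Iterable, Optional
--
-- def _max_priority(priorities: Iterable[str]) -> str:
--     """Return the highest priority (``high`` > ``medium`` > ``low``).
--
--     Used by :meth:`FRStore.merge` when the caller doesn't pin a priority —
--     the merged FR inherits the maximum across its sources so a high-priority
--     source doesn't silently get demoted.
--     """
--     order = {"high": 2, "medium": 1, "low": 0}
--     best = "medium"
--     best_score = 1
--     for p in priorities:
--         score = order.get(p, 1)
--         if score > best_score:
--             best = p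
--             best_score = score
--     return best
-- ===== SOURCE B (Python) =====
-- def _max_priority(priorities):
--     """Return "high" iff any source priority is "high", else "medium".
--
--     Only "high" (score 2) can beat the starting best_score of 1 in the
--     original scan, so the result is fully determined by membership.
--     """
--     return "high" if any(p == "high" for p in priorities) else "medium"
-- ===== Notes on version B (the rewrite author's own statement) =====
-- stated objective: simpler
-- what changed: Replaced the running best/best_score max-scan over a score dict by a short-circuiting membership test: only "high" can ever beat the initial score 1, so the result is "high" iff "high" occurs, else "medium".
import Mathlib
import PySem

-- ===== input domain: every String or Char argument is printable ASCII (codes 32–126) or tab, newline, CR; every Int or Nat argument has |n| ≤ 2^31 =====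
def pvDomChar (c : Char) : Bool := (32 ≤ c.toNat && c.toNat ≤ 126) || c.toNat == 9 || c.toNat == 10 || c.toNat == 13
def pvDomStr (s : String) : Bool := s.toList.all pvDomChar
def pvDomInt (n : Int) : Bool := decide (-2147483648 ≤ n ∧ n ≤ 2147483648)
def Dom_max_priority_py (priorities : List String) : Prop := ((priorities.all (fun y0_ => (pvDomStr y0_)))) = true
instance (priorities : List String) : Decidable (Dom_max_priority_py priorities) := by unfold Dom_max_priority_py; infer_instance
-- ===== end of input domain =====

-- B replaces A's running best/best_score max-scan by a membership test (only "high" can beat the initial score): simpler.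


-- ===== PORT A =====
def max_priority_py (priorities : List String) : String :=
  let order : PySem.Dict String Int :=
    PySem.Dict.ofList [("high", 2), ("medium", 1), ("low", 0)]
  let st := priorities.foldl (fun (st : String × Int) p =>
    let score := order.getD p 1
    if score > st.2 then (p, score) else st) ("medium", 1)
  st.1

-- ===== PORT B =====
def max_priority_py_alt (priorities : List String) : String :=
  if priorities.any (fun p => p == "high") then "high" else "medium"

-- ===== PRECONDITION & SPEC =====
def Spec_max_priority_py (priorities : List String) (out : String) : Prop := out = max_priority_py_alt priorities
instance (priorities : List String) (out : String) : Decidable (Spec_max_priority_py priorities out) := by unfold Spec_max_priority_py; infer_instance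

-- ===== CLAIM (what is proved, stated in full; the proofs are below) =====
def Claim_equal_max_priority_py : Prop := ∀ (priorities : List String), Dom_max_priority_py priorities → Spec_max_priority_py priorities (max_priority_py priorities)

-- ===== LEMMAS AND PROOFS =====

-- A's loop body, named for the proofs (definitionally the lambda in the port)
def pvF (st : String × Int) (p : String) : String × Int :=
  let score := (PySem.Dict.ofList [("high", (2:Int)), ("medium", 1), ("low", 0)]).getD p 1
  if score > st.2 then (p, score) else st

lemma pvScore_eq (p : String) :
    (PySem.Dict.ofList [("high", (2:Int)), ("medium", 1), ("low", 0)]).getD p 1 =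
      if p = "high" then 2 else if p = "low" then 0 else 1 := by
  have h : PySem.Dict.ofList [("high", (2:Int)), ("medium", 1), ("low", 0)] =
      PySem.Dict.mk [("high", 2), ("medium", 1), ("low", 0)] := by decide
  rw [h]
  simp only [PySem.Dict.getD, PySem.Dict.get?_mk_cons, beq_iff_eq]
  by_cases h1 : p = "high" <;> by_cases h2 : p = "low" <;> by_cases h3 : p = "medium" <;>
    simp [h1, h2, h3, eq_comm, PySem.Dict.get?]

lemma pvStep_high (p : String) : pvF ("high", 2) p = ("high", 2) := by
  unfold pvF
  simp only [pvScore_eq]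
  split_ifs <;> first | rfl | omega

lemma pvStep_tohigh : pvF ("medium", 1) "high" = ("high", 2) := by
  simp [pvF, pvScore_eq]

lemma pvStep_other (p : String) (hp : p ≠ "high") : pvF ("medium", 1) p = ("medium", 1) := by
  unfold pvF
  simp only [pvScore_eq, if_neg hp]
  split_ifs <;> first | rfl | omega

-- once the state holds score 2 it never changes
lemma pvFold_high (l : List String) : l.foldl pvF ("high", 2) = ("high", 2) := by
  induction l with
  | nil => rfl
  | cons p t ih => rw [List.foldl_cons, pvStep_high]; exact ih

-- the loop from the initial state returns "high" iff "high" occurs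
lemma pvFold_char (l : List String) :
    l.foldl pvF ("medium", 1) =
      (if l.any (fun p => p == "high") then ("high", 2) else ("medium", 1)) := by
  induction l with
  | nil => rfl
  | cons p t ih =>
      rw [List.foldl_cons]
      by_cases hp : p = "high"
      · subst hp
        rw [pvStep_tohigh]
        simp [pvFold_high t]
      · rw [pvStep_other p hp]
        simpa [hp] using ih

-- ===== VERDICT (by name: the statement is the Claim_ definition above) =====
theorem max_priority_py_spec : Claim_equal_max_priority_py := by
  intro priorities _
  unfold Spec_max_priority_py max_priority_py max_priority_py_alt
  simp only []
  rw [show (fun (st : String × Int) p =>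
    let score := (PySem.Dict.ofList [("high", (2:Int)), ("medium", 1), ("low", 0)]).getD p 1
    if score > st.2 then (p, score) else st) = pvF from rfl, pvFold_char]
  split_ifs <;> rfl
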